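-- pv_equiv track=rewrite | github.com/data-desk-eco/sift | src/sift/commands.py | _count_descendants
-- ===== SOURCE A (Python) =====
-- def _count_descendants(eid: str, children_of: dict[str, list[dict]]) -> int:
--     stack = [eid]
--     visited = {eid}
--     n = 0
--     while stack:
--         cur = stack.pop()
--         for k in children_of.get(cur, []):
--             kid = k.get("id")
--             if not kid or kid in visited:
--                 continue
--             visited.add(kid)
--             n += 1
--             stack.append(kid)
--     return n
-- ===== SOURCE B (Python) =====
-- def _count_descendants(eid: str, children_of: dict[str, list[dict]]) -> int:
--     # Round-based fixpoint closure instead of an explicit DFS stack: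
--     # repeatedly sweep the already-discovered nodes and add their unseen
--     # children, until a full sweep adds nothing; answer = |visited| - 1.
--     visited = [eid]  # distinct ids in discovery order
--     changed = True
--     while changed:
--         changed = False
--         for cur in list(visited):
--             for k in children_of.get(cur, []):
--                 kid = k.get("id")
--                 if kid and kid not in visited:
--                     visited.append(kid)
--                     changed = True
--     return len(visited) - 1
-- ===== Notes on version B (the rewrite author's own statement) =====
-- stated objective: alternative
-- what changed: Replaces A's explicit-stack DFS with a per-node counter by a round-based fixpoint closure: repeatedly sweep the already-discovered list and append unseen truthy child ids until a full sweep adds nothing, then return len(visited) - 1.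
import Mathlib
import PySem

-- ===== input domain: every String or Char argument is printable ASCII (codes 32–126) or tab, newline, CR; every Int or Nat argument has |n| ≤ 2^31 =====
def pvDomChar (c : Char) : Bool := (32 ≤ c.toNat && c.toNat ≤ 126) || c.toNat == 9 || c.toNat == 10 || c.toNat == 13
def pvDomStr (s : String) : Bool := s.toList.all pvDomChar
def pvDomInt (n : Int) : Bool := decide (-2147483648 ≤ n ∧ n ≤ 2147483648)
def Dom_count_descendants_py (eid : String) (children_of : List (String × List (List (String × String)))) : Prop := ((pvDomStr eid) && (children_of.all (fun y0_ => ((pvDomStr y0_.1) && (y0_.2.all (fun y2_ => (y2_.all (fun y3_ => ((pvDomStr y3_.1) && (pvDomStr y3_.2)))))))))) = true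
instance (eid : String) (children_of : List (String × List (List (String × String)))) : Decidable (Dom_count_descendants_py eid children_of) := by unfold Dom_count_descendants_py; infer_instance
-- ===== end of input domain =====

-- B replaces A's explicit-stack DFS by a round-based fixpoint closure (repeated sweeps of the
-- discovered set until a sweep adds nothing), returning len(visited) - 1; objective: alternative.
-- Shared helpers (the same Python expressions occur verbatim in A and B):
-- children_of.get(cur, [])
def pvKids (children_of : List (String × List (List (String × String)))) (cur : String) : List (List (String × String)) :=
  PySem.Dict.getD (PySem.Dict.mk children_of) cur []

-- k.get("id")
def pvKidId (k : List (String × String)) : Option String :=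
  PySem.Dict.get? (PySem.Dict.mk k) "id"

-- All id strings occurring anywhere in children_of (termination universe for both loops).
def pvAllIds (children_of : List (String × List (List (String × String)))) : List String :=
  children_of.flatMap (fun p => p.2.filterMap pvKidId)

-- Number of universe entries not yet visited (termination measure for both loops).
def pvUnvis (children_of : List (String × List (List (String × String)))) (v : List String) : Nat :=
  ((pvAllIds children_of).filter (fun x => decide (x ∉ v))).length

lemma pvUnvis_lt (cof : List (String × List (List (String × String)))) {v : List String} {kid : String}
    (hU : kid ∈ pvAllIds cof) (hv : kid ∉ v) : pvUnvis cof (v ++ [kid]) < pvUnvis cof v := by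
  unfold pvUnvis
  have hsplit : (pvAllIds cof).filter (fun x => decide (x ∉ v ++ [kid]))
      = ((pvAllIds cof).filter (fun x => decide (x ∉ v))).filter (fun x => decide (x ≠ kid)) := by
    rw [List.filter_filter]
    apply List.filter_congr
    intro x _
    simp [List.mem_append, not_or, and_comm]
  rw [hsplit]
  apply List.length_filter_lt_length_iff_exists.2
  exact ⟨kid, by simp [hU, hv], by simp⟩

lemma pvKidsIds_subset (cof : List (String × List (List (String × String)))) (cur : String) :
    ∀ x, (∃ k ∈ pvKids cof cur, pvKidId k = some x) → x ∈ pvAllIds cof := by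
  rintro x ⟨k, hk, hid⟩
  unfold pvKids at hk
  rw [PySem.Dict.getD_eq_get?_getD] at hk
  cases hget : PySem.Dict.get? (PySem.Dict.mk cof) cur with
  | none => rw [hget] at hk; simp at hk
  | some kids =>
    rw [hget] at hk
    simp only [Option.getD_some] at hk
    have hmem : (cur, kids) ∈ cof := PySem.Dict.mem_items_of_get?_eq_some _ hget
    unfold pvAllIds
    exact List.mem_flatMap.2 ⟨(cur, kids), hmem, List.mem_filterMap.2 ⟨k, hk, hid⟩⟩

-- ===== PORT A =====
-- A's inner `for k in children_of.get(cur, [])` body; state = (visited, stack, n).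
-- (visited is a Python set; stack top is kept at the head — Python appends and pops at the same end.)
def pvStepA (st : List String × List String × Int) (k : List (String × String)) : List String × List String × Int :=
  match pvKidId k with
  | none => st                                        -- `if not kid ...: continue` (kid is None)
  | some kid =>
    if kid = "" ∨ kid ∈ st.1 then st                  -- `if not kid or kid in visited: continue`
    else (PySem.Set.add st.1 kid, kid :: st.2.1, st.2.2 + 1)

lemma pvStepA_none (st : List String × List String × Int) (k : List (String × String))
    (h : pvKidId k = none) : pvStepA st k = st := by
  simp [pvStepA, h]

lemma pvStepA_skip (st : List String × List String × Int) (k : List (String × String)) (kid : String)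
    (h : pvKidId k = some kid) (hs : kid = "" ∨ kid ∈ st.1) : pvStepA st k = st := by
  simp only [pvStepA, h, if_pos hs]

lemma pvStepA_add (v s : List String) (n : Int) (k : List (String × String)) (kid : String)
    (h : pvKidId k = some kid) (h1 : ¬(kid = "" ∨ kid ∈ v)) :
    pvStepA (v, s, n) k = (v ++ [kid], kid :: s, n + 1) := by
  simp only [not_or] at h1
  simp [pvStepA, h, PySem.Set.add, PySem.Set.contains, h1.1, h1.2]

lemma pvStepA_fold_meas (cof : List (String × List (List (String × String))))
    (kids : List (List (String × String)))
    (h : ∀ x, (∃ k ∈ kids, pvKidId k = some x) → x ∈ pvAllIds cof) :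
    ∀ v s n, (kids.foldl pvStepA (v, s, n)).2.1.length + 2 * pvUnvis cof (kids.foldl pvStepA (v, s, n)).1
        ≤ s.length + 2 * pvUnvis cof v := by
  induction kids with
  | nil => intro v s n; simp
  | cons k rest ih =>
    intro v s n
    have hrest : ∀ x, (∃ k' ∈ rest, pvKidId k' = some x) → x ∈ pvAllIds cof := by
      rintro x ⟨k', hk', hx⟩; exact h x ⟨k', List.mem_cons_of_mem _ hk', hx⟩
    rw [List.foldl_cons]
    cases hid : pvKidId k with
    | none => rw [pvStepA_none _ _ hid]; exact ih hrest v s n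
    | some kid =>
      by_cases hskip : kid = "" ∨ kid ∈ v
      · rw [pvStepA_skip _ _ _ hid hskip]; exact ih hrest v s n
      · rw [pvStepA_add _ _ _ _ _ hid hskip]
        simp only [not_or] at hskip
        have hkU : kid ∈ pvAllIds cof := h kid ⟨k, List.mem_cons_self, hid⟩
        have hlt := pvUnvis_lt cof hkU hskip.2
        have hih := ih hrest (v ++ [kid]) (kid :: s) (n + 1)
        simp only [List.length_cons] at hih ⊢
        omega

-- A's `while stack:` loop; returns the final (visited, n); the port's result is the .2 component.
def pvLoopA (cof : List (String × List (List (String × String)))) (v s : List String) (n : Int) :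
    List String × Int :=
  match s with
  | [] => (v, n)
  | cur :: rest =>
    pvLoopA cof ((pvKids cof cur).foldl pvStepA (v, rest, n)).1
      ((pvKids cof cur).foldl pvStepA (v, rest, n)).2.1
      ((pvKids cof cur).foldl pvStepA (v, rest, n)).2.2
termination_by s.length + 2 * pvUnvis cof v
decreasing_by
  have h := pvStepA_fold_meas cof (pvKids cof cur) (pvKidsIds_subset cof cur) v rest n
  simp only [List.length_cons]; omega

def count_descendants_py (eid : String) (children_of : List (String × List (List (String × String)))) : Int :=
  (pvLoopA children_of (PySem.Set.ofList [eid]) [eid] 0).2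

-- ===== PORT B =====
-- B's innermost `for k in children_of.get(cur, [])` body; state = (visited list, changed flag).
def pvInnerB (st : List String × Bool) (k : List (String × String)) : List String × Bool :=
  match pvKidId k with
  | none => st
  | some kid =>
    if kid ≠ "" ∧ kid ∉ st.1 then (st.1 ++ [kid], true)   -- `visited.append(kid); changed = True`
    else st

-- one `cur` of the sweep
def pvStepB (cof : List (String × List (List (String × String)))) (st : List String × Bool)
    (cur : String) : List String × Bool :=
  (pvKids cof cur).foldl pvInnerB st

-- one full sweep `for cur in list(visited)` starting with `changed = False`
def pvRoundB (cof : List (String × List (List (String × String)))) (v : List String) :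
    List String × Bool :=
  v.foldl (pvStepB cof) (v, false)

lemma pvInnerB_none (st : List String × Bool) (k : List (String × String))
    (h : pvKidId k = none) : pvInnerB st k = st := by
  simp [pvInnerB, h]

lemma pvInnerB_skip (st : List String × Bool) (k : List (String × String)) (kid : String)
    (h : pvKidId k = some kid) (hs : ¬(kid ≠ "" ∧ kid ∉ st.1)) : pvInnerB st k = st := by
  simp only [pvInnerB, h, if_neg hs]

lemma pvInnerB_add (acc : List String) (ch : Bool) (k : List (String × String)) (kid : String)
    (h : pvKidId k = some kid) (h1 : kid ≠ "" ∧ kid ∉ acc) :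
    pvInnerB (acc, ch) k = (acc ++ [kid], true) := by
  simp only [pvInnerB, h, if_pos h1]

lemma pvInnerB_fold_unvis (cof : List (String × List (List (String × String))))
    (kids : List (List (String × String)))
    (h : ∀ x, (∃ k ∈ kids, pvKidId k = some x) → x ∈ pvAllIds cof) :
    ∀ acc ch, pvUnvis cof (kids.foldl pvInnerB (acc, ch)).1 ≤ pvUnvis cof acc ∧
      ((kids.foldl pvInnerB (acc, ch)).2 = true → ch = true ∨
        pvUnvis cof (kids.foldl pvInnerB (acc, ch)).1 < pvUnvis cof acc) := by
  induction kids with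
  | nil => intro acc ch; exact ⟨le_refl _, fun h' => Or.inl h'⟩
  | cons k rest ih =>
    intro acc ch
    have hrest : ∀ x, (∃ k' ∈ rest, pvKidId k' = some x) → x ∈ pvAllIds cof := by
      rintro x ⟨k', hk', hx⟩; exact h x ⟨k', List.mem_cons_of_mem _ hk', hx⟩
    rw [List.foldl_cons]
    cases hid : pvKidId k with
    | none => rw [pvInnerB_none _ _ hid]; exact ih hrest acc ch
    | some kid =>
      by_cases hadd : kid ≠ "" ∧ kid ∉ acc
      · rw [pvInnerB_add _ _ _ _ hid hadd]
        have hkU : kid ∈ pvAllIds cof := h kid ⟨k, List.mem_cons_self, hid⟩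
        have hlt := pvUnvis_lt cof hkU hadd.2
        obtain ⟨hle, _⟩ := ih hrest (acc ++ [kid]) true
        exact ⟨le_of_lt (lt_of_le_of_lt hle hlt), fun _ => Or.inr (lt_of_le_of_lt hle hlt)⟩
      · rw [pvInnerB_skip _ _ _ hid hadd]; exact ih hrest acc ch

lemma pvStepB_fold_unvis (cof : List (String × List (List (String × String)))) (l : List String) :
    ∀ acc ch, pvUnvis cof (l.foldl (pvStepB cof) (acc, ch)).1 ≤ pvUnvis cof acc ∧
      ((l.foldl (pvStepB cof) (acc, ch)).2 = true → ch = true ∨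
        pvUnvis cof (l.foldl (pvStepB cof) (acc, ch)).1 < pvUnvis cof acc) := by
  induction l with
  | nil => intro acc ch; exact ⟨le_refl _, fun h' => Or.inl h'⟩
  | cons cur rest ih =>
    intro acc ch
    rw [List.foldl_cons]
    have h1 := pvInnerB_fold_unvis cof (pvKids cof cur) (pvKidsIds_subset cof cur) acc ch
    have hstep : pvStepB cof (acc, ch) cur = ((pvKids cof cur).foldl pvInnerB (acc, ch)) := rfl
    obtain ⟨h1le, h1fl⟩ := h1
    obtain ⟨h2le, h2fl⟩ := ih (pvStepB cof (acc, ch) cur).1 (pvStepB cof (acc, ch) cur).2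
    rw [hstep] at h2le h2fl
    constructor
    · exact le_trans h2le h1le
    · intro hfin
      rcases h2fl hfin with hch | hlt
      · rcases h1fl hch with hch' | hlt'
        · exact Or.inl hch'
        · exact Or.inr (lt_of_le_of_lt h2le hlt')
      · exact Or.inr (lt_of_lt_of_le hlt h1le)

lemma pvRoundB_lt (cof : List (String × List (List (String × String)))) (v : List String)
    (h : (pvRoundB cof v).2 = true) : pvUnvis cof (pvRoundB cof v).1 < pvUnvis cof v := by
  have := pvStepB_fold_unvis cof v v false
  rcases (this.2 h) with h' | h'
  · exact absurd h' (by simp)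
  · exact h'

-- B's `while changed:` loop
def pvLoopB (cof : List (String × List (List (String × String)))) (v : List String) : List String :=
  if h : (pvRoundB cof v).2 = true then pvLoopB cof (pvRoundB cof v).1
  else (pvRoundB cof v).1
termination_by pvUnvis cof v
decreasing_by exact pvRoundB_lt cof v h

def count_descendants_py_alt (eid : String) (children_of : List (String × List (List (String × String)))) : Int :=
  ((pvLoopB children_of [eid]).length : Int) - 1

-- ===== PRECONDITION & SPEC =====
def Spec_count_descendants_py (eid : String) (children_of : List (String × List (List (String × String)))) (out : Int) : Prop := out = count_descendants_py_alt eid children_of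
instance (eid : String) (children_of : List (String × List (List (String × String)))) (out : Int) : Decidable (Spec_count_descendants_py eid children_of out) := by unfold Spec_count_descendants_py; infer_instance

-- ===== CLAIM (what is proved, stated in full; the proofs are below) =====
def Claim_equal_count_descendants_py : Prop := ∀ (eid : String) (children_of : List (String × List (List (String × String)))), Dom_count_descendants_py eid children_of → Spec_count_descendants_py eid children_of (count_descendants_py eid children_of)

-- ===== LEMMAS AND PROOFS =====

-- x is reachable from eid along truthy-id child edges
inductive pvReach (cof : List (String × List (List (String × String)))) (eid : String) : String → Prop
  | base : pvReach cof eid eid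
  | step {a b : String} : pvReach cof eid a → (∃ k ∈ pvKids cof a, pvKidId k = some b) → b ≠ "" →
      pvReach cof eid b

lemma pvReach_subset_closed {cof : List (String × List (List (String × String)))} {eid : String}
    {V : List String} (hbase : eid ∈ V)
    (hcl : ∀ a ∈ V, ∀ b, (∃ k ∈ pvKids cof a, pvKidId k = some b) → b ≠ "" → b ∈ V) :
    ∀ x, pvReach cof eid x → x ∈ V := by
  intro x h
  induction h with
  | base => exact hbase
  | step ha he hb ih => exact hcl _ ih _ he hb

-- everything the A-side inner fold guarantees
lemma pvFoldA_master (kids : List (List (String × String))) :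
    ∀ v s n,
      (∀ x ∈ v, x ∈ (kids.foldl pvStepA (v, s, n)).1) ∧
      (∀ x ∈ s, x ∈ (kids.foldl pvStepA (v, s, n)).2.1) ∧
      ((kids.foldl pvStepA (v, s, n)).2.2
        = n + ((kids.foldl pvStepA (v, s, n)).1.length : Int) - (v.length : Int)) ∧
      (v.Nodup → (kids.foldl pvStepA (v, s, n)).1.Nodup) ∧
      (∀ x ∈ (kids.foldl pvStepA (v, s, n)).1,
        x ∈ v ∨ (x ∈ (kids.foldl pvStepA (v, s, n)).2.1 ∧
                 (∃ k ∈ kids, pvKidId k = some x) ∧ x ≠ "")) ∧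
      (∀ x ∈ (kids.foldl pvStepA (v, s, n)).2.1, x ∈ s ∨ x ∈ (kids.foldl pvStepA (v, s, n)).1) ∧
      (∀ b, (∃ k ∈ kids, pvKidId k = some b) → b ≠ "" → b ∈ (kids.foldl pvStepA (v, s, n)).1) := by
  induction kids with
  | nil =>
    intro v s n
    refine ⟨fun x hx => hx, fun x hx => hx, by simp, fun h => h, fun x hx => Or.inl hx,
      fun x hx => Or.inl hx, ?_⟩
    rintro b ⟨k, hk, -⟩ -
    exact absurd hk (List.not_mem_nil)
  | cons k rest ih =>
    intro v s n
    rw [List.foldl_cons]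
    cases hid : pvKidId k with
    | none =>
      rw [pvStepA_none _ _ hid]
      obtain ⟨a1, a2, a3, a4, a5, a6, a7⟩ := ih v s n
      refine ⟨a1, a2, a3, a4, ?_, a6, ?_⟩
      · intro x hx
        rcases a5 x hx with h' | ⟨hst, ⟨k', hk', hx'⟩, hne⟩
        · exact Or.inl h'
        · exact Or.inr ⟨hst, ⟨k', List.mem_cons_of_mem _ hk', hx'⟩, hne⟩
      · rintro b ⟨k', hk', hb⟩ hne
        rcases List.mem_cons.1 hk' with rfl | hk'
        · rw [hid] at hb; exact absurd hb (by simp)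
        · exact a7 b ⟨k', hk', hb⟩ hne
    | some kid =>
      by_cases hskip : kid = "" ∨ kid ∈ v
      · rw [pvStepA_skip _ _ _ hid hskip]
        obtain ⟨a1, a2, a3, a4, a5, a6, a7⟩ := ih v s n
        refine ⟨a1, a2, a3, a4, ?_, a6, ?_⟩
        · intro x hx
          rcases a5 x hx with h' | ⟨hst, ⟨k', hk', hx'⟩, hne⟩
          · exact Or.inl h'
          · exact Or.inr ⟨hst, ⟨k', List.mem_cons_of_mem _ hk', hx'⟩, hne⟩
        · rintro b ⟨k', hk', hb⟩ hne
          rcases List.mem_cons.1 hk' with rfl | hk'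
          · rw [hid] at hb
            have hbkid : kid = b := by injection hb
            subst hbkid
            rcases hskip with h' | h'
            · exact absurd h' hne
            · exact a1 _ h'
          · exact a7 b ⟨k', hk', hb⟩ hne
      · rw [pvStepA_add _ _ _ _ _ hid hskip]
        simp only [not_or] at hskip
        obtain ⟨hne0, hnv⟩ := hskip
        obtain ⟨a1, a2, a3, a4, a5, a6, a7⟩ := ih (v ++ [kid]) (kid :: s) (n + 1)
        refine ⟨?_, ?_, ?_, ?_, ?_, ?_, ?_⟩
        · intro x hx; exact a1 x (List.mem_append_left _ hx)
        · intro x hx; exact a2 x (List.mem_cons_of_mem _ hx)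
        · rw [a3]; simp only [List.length_append, List.length_singleton]; push_cast; ring
        · intro hnd
          refine a4 ?_
          refine hnd.append (List.nodup_singleton _) ?_
          intro a ha hb
          rw [List.mem_singleton] at hb
          exact hnv (hb ▸ ha)
        · intro x hx
          rcases a5 x hx with h' | ⟨hst, ⟨k', hk', hx'⟩, hne⟩
          · rcases List.mem_append.1 h' with h'' | h''
            · exact Or.inl h''
            · have hxkid : x = kid := by simpa using h''
              subst hxkid
              exact Or.inr ⟨a2 x List.mem_cons_self, ⟨k, List.mem_cons_self, hid⟩, hne0⟩
          · exact Or.inr ⟨hst, ⟨k', List.mem_cons_of_mem _ hk', hx'⟩, hne⟩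
        · intro x hx
          rcases a6 x hx with h' | h'
          · rcases List.mem_cons.1 h' with rfl | h''
            · exact Or.inr (a1 x (List.mem_append_right _ List.mem_cons_self))
            · exact Or.inl h''
          · exact Or.inr h'
        · rintro b ⟨k', hk', hb⟩ hne
          rcases List.mem_cons.1 hk' with rfl | hk'
          · rw [hid] at hb
            have hbkid : kid = b := by injection hb
            subst hbkid
            exact a1 _ (List.mem_append_right _ List.mem_cons_self)
          · exact a7 b ⟨k', hk', hb⟩ hne

def pvGoodA (cof : List (String × List (List (String × String)))) (eid : String)
    (v s : List String) : Prop :=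
  (∀ x ∈ s, x ∈ v) ∧ (∀ x ∈ v, pvReach cof eid x) ∧ v.Nodup ∧ eid ∈ v ∧
  (∀ a ∈ v, a ∈ s ∨ ∀ b, (∃ k ∈ pvKids cof a, pvKidId k = some b) → b ≠ "" → b ∈ v)

lemma pvLoopA_master (cof : List (String × List (List (String × String)))) (eid : String) :
    ∀ v s n, pvGoodA cof eid v s →
      ((pvLoopA cof v s n).2 = n + ((pvLoopA cof v s n).1.length : Int) - (v.length : Int)) ∧
      (pvLoopA cof v s n).1.Nodup ∧
      (∀ x, x ∈ (pvLoopA cof v s n).1 ↔ pvReach cof eid x) := by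
  intro v s n
  fun_induction pvLoopA cof v s n with
  | case1 v n =>
    rintro ⟨g1, g2, g3, g4, g5⟩
    refine ⟨by simp, g3, ?_⟩
    intro x
    constructor
    · exact g2 x
    · refine pvReach_subset_closed g4 ?_ x
      intro a ha b hb hne
      rcases g5 a ha with hmem | hcl
      · exact absurd hmem List.not_mem_nil
      · exact hcl b hb hne
  | case2 v n cur rest ih =>
    rintro ⟨g1, g2, g3, g4, g5⟩
    obtain ⟨a1, a2, a3, a4, a5, a6, a7⟩ := pvFoldA_master (pvKids cof cur) v rest n
    have hGood : pvGoodA cof eid ((pvKids cof cur).foldl pvStepA (v, rest, n)).1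
        ((pvKids cof cur).foldl pvStepA (v, rest, n)).2.1 := by
      refine ⟨?_, ?_, a4 g3, a1 eid g4, ?_⟩
      · intro x hx
        rcases a6 x hx with hmem | hmem
        · exact a1 x (g1 x (List.mem_cons_of_mem _ hmem))
        · exact hmem
      · intro x hx
        rcases a5 x hx with hmem | ⟨hst, he, hne⟩
        · exact g2 x hmem
        · exact pvReach.step (g2 cur (g1 cur List.mem_cons_self)) he hne
      · intro a ha
        rcases a5 a ha with hmem | ⟨hst, he, hne⟩
        · rcases g5 a hmem with hst' | hcl
          · rcases List.mem_cons.1 hst' with rfl | hmem'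
            · right; intro b hb hbne; exact a7 b hb hbne
            · left; exact a2 a hmem'
          · right; intro b hb hbne; exact a1 b (hcl b hb hbne)
        · left; exact hst
    obtain ⟨c1, c2, c3⟩ := ih hGood
    refine ⟨?_, c2, c3⟩
    rw [c1, a3]
    ring

-- everything the B-side innermost fold guarantees
lemma pvFoldInnerB_master (kids : List (List (String × String))) :
    ∀ acc ch,
      (∀ x ∈ acc, x ∈ (kids.foldl pvInnerB (acc, ch)).1) ∧
      (acc.Nodup → (kids.foldl pvInnerB (acc, ch)).1.Nodup) ∧
      (∀ x ∈ (kids.foldl pvInnerB (acc, ch)).1,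
        x ∈ acc ∨ ((∃ k ∈ kids, pvKidId k = some x) ∧ x ≠ "")) ∧
      (ch = true → (kids.foldl pvInnerB (acc, ch)).2 = true) ∧
      ((kids.foldl pvInnerB (acc, ch)).2 = false → (kids.foldl pvInnerB (acc, ch)).1 = acc) ∧
      (∀ b, (∃ k ∈ kids, pvKidId k = some b) → b ≠ "" → b ∈ (kids.foldl pvInnerB (acc, ch)).1) := by
  induction kids with
  | nil =>
    intro acc ch
    refine ⟨fun x hx => hx, fun h => h, fun x hx => Or.inl hx, fun h => h, fun _ => rfl, ?_⟩
    rintro b ⟨k, hk, -⟩ -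
    exact absurd hk List.not_mem_nil
  | cons k rest ih =>
    intro acc ch
    rw [List.foldl_cons]
    cases hid : pvKidId k with
    | none =>
      rw [pvInnerB_none _ _ hid]
      obtain ⟨b1, b2, b3, b4, b5, b6⟩ := ih acc ch
      refine ⟨b1, b2, ?_, b4, b5, ?_⟩
      · intro x hx
        rcases b3 x hx with hmem | ⟨⟨k1, hk1, hx1⟩, hne⟩
        · exact Or.inl hmem
        · exact Or.inr ⟨⟨k1, List.mem_cons_of_mem _ hk1, hx1⟩, hne⟩
      · rintro b ⟨k1, hk1, hb⟩ hne
        rcases List.mem_cons.1 hk1 with rfl | hk1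
        · rw [hid] at hb; exact absurd hb (by simp)
        · exact b6 b ⟨k1, hk1, hb⟩ hne
    | some kid =>
      by_cases hadd : kid ≠ "" ∧ kid ∉ acc
      · rw [pvInnerB_add _ _ _ _ hid hadd]
        obtain ⟨b1, b2, b3, b4, b5, b6⟩ := ih (acc ++ [kid]) true
        refine ⟨?_, ?_, ?_, ?_, ?_, ?_⟩
        · intro x hx; exact b1 x (List.mem_append_left _ hx)
        · intro hnd
          refine b2 (hnd.append (List.nodup_singleton _) ?_)
          intro a ha hb
          rw [List.mem_singleton] at hb
          exact hadd.2 (hb ▸ ha)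
        · intro x hx
          rcases b3 x hx with hmem | ⟨⟨k1, hk1, hx1⟩, hne⟩
          · rcases List.mem_append.1 hmem with hv | hv
            · exact Or.inl hv
            · have hxk : x = kid := by simpa using hv
              subst hxk
              exact Or.inr ⟨⟨k, List.mem_cons_self, hid⟩, hadd.1⟩
          · exact Or.inr ⟨⟨k1, List.mem_cons_of_mem _ hk1, hx1⟩, hne⟩
        · intro _; exact b4 rfl
        · intro hfin
          have := b4 rfl
          rw [hfin] at this
          exact absurd this (by simp)
        · rintro b ⟨k1, hk1, hb⟩ hne
          rcases List.mem_cons.1 hk1 with rfl | hk1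
          · rw [hid] at hb
            have hbk : kid = b := by injection hb
            exact hbk ▸ b1 _ (List.mem_append_right _ List.mem_cons_self)
          · exact b6 b ⟨k1, hk1, hb⟩ hne
      · rw [pvInnerB_skip _ _ _ hid hadd]
        obtain ⟨b1, b2, b3, b4, b5, b6⟩ := ih acc ch
        refine ⟨b1, b2, ?_, b4, b5, ?_⟩
        · intro x hx
          rcases b3 x hx with hmem | ⟨⟨k1, hk1, hx1⟩, hne⟩
          · exact Or.inl hmem
          · exact Or.inr ⟨⟨k1, List.mem_cons_of_mem _ hk1, hx1⟩, hne⟩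
        · rintro b ⟨k1, hk1, hb⟩ hne
          rcases List.mem_cons.1 hk1 with rfl | hk1
          · rw [hid] at hb
            have hbk : kid = b := by injection hb
            rcases not_and_or.1 hadd with h0 | h0
            · exact absurd (hbk ▸ not_not.1 h0) hne
            · exact hbk ▸ b1 _ (not_not.1 h0)
          · exact b6 b ⟨k1, hk1, hb⟩ hne

-- everything one full sweep (fold of pvStepB over the snapshot l) guarantees
lemma pvFoldStepB_master (cof : List (String × List (List (String × String)))) (l : List String) :
    ∀ acc ch,
      (∀ x ∈ acc, x ∈ (l.foldl (pvStepB cof) (acc, ch)).1) ∧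
      (acc.Nodup → (l.foldl (pvStepB cof) (acc, ch)).1.Nodup) ∧
      (∀ x ∈ (l.foldl (pvStepB cof) (acc, ch)).1,
        x ∈ acc ∨ ∃ cur ∈ l, (∃ k ∈ pvKids cof cur, pvKidId k = some x) ∧ x ≠ "") ∧
      (ch = true → (l.foldl (pvStepB cof) (acc, ch)).2 = true) ∧
      ((l.foldl (pvStepB cof) (acc, ch)).2 = false → (l.foldl (pvStepB cof) (acc, ch)).1 = acc) ∧
      (∀ cur ∈ l, ∀ b, (∃ k ∈ pvKids cof cur, pvKidId k = some b) → b ≠ "" →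
        b ∈ (l.foldl (pvStepB cof) (acc, ch)).1) := by
  induction l with
  | nil =>
    intro acc ch
    exact ⟨fun x hx => hx, fun h => h, fun x hx => Or.inl hx, fun h => h, fun _ => rfl,
      fun cur hc => absurd hc List.not_mem_nil⟩
  | cons cur rest ih =>
    intro acc ch
    rw [List.foldl_cons]
    obtain ⟨i1, i2, i3, i4, i5, i6⟩ := pvFoldInnerB_master (pvKids cof cur) acc ch
    obtain ⟨j1, j2, j3, j4, j5, j6⟩ := ih ((pvKids cof cur).foldl pvInnerB (acc, ch)).1
      ((pvKids cof cur).foldl pvInnerB (acc, ch)).2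
    refine ⟨?_, ?_, ?_, ?_, ?_, ?_⟩
    · intro x hx; exact j1 x (i1 x hx)
    · intro hnd; exact j2 (i2 hnd)
    · intro x hx
      rcases j3 x hx with hmem | ⟨cur1, hcur1, he⟩
      · rcases i3 x hmem with hv | ⟨he, hne⟩
        · exact Or.inl hv
        · exact Or.inr ⟨cur, List.mem_cons_self, he, hne⟩
      · exact Or.inr ⟨cur1, List.mem_cons_of_mem _ hcur1, he⟩
    · intro hch; exact j4 (i4 hch)
    · intro hfin
      cases h2 : ((pvKids cof cur).foldl pvInnerB (acc, ch)).2 with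
      | true =>
        have hfin2 : (rest.foldl (pvStepB cof) (((pvKids cof cur).foldl pvInnerB (acc, ch)).1,
            ((pvKids cof cur).foldl pvInnerB (acc, ch)).2)).2 = false := hfin
        rw [j4 h2] at hfin2
        exact absurd hfin2 (by simp)
      | false =>
        exact (j5 hfin).trans (i5 h2)
    · intro cur1 hcur1 b hb hne
      rcases List.mem_cons.1 hcur1 with rfl | hmem
      · exact j1 b (i6 b hb hne)
      · exact j6 cur1 hmem b hb hne

def pvGoodB (cof : List (String × List (List (String × String)))) (eid : String)
    (v : List String) : Prop :=
  v.Nodup ∧ eid ∈ v ∧ (∀ x ∈ v, pvReach cof eid x)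

lemma pvLoopB_master (cof : List (String × List (List (String × String)))) (eid : String) :
    ∀ v, pvGoodB cof eid v →
      (pvLoopB cof v).Nodup ∧ (∀ x, x ∈ pvLoopB cof v ↔ pvReach cof eid x) := by
  intro v
  fun_induction pvLoopB cof v with
  | case1 v h ih =>
    rintro ⟨g1, g2, g3⟩
    obtain ⟨i1, i2, i3, i4, i5, i6⟩ := pvFoldStepB_master cof v v false
    refine ih ⟨i2 g1, i1 eid g2, ?_⟩
    intro x hx
    rcases i3 x hx with hmem | ⟨cur, hcur, he, hne⟩
    · exact g3 x hmem
    · exact pvReach.step (g3 cur hcur) he hne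
  | case2 v h =>
    rintro ⟨g1, g2, g3⟩
    obtain ⟨i1, i2, i3, i4, i5, i6⟩ := pvFoldStepB_master cof v v false
    have hunch : (pvRoundB cof v).1 = v := i5 (by simpa using h)
    constructor
    · rw [hunch]; exact g1
    · intro x
      rw [hunch]
      constructor
      · exact g3 x
      · refine pvReach_subset_closed g2 ?_ x
        intro a ha b hb hne
        have hunch2 : (v.foldl (pvStepB cof) (v, false)).1 = v := hunch
        have hbmem := i6 a ha b hb hne
        rwa [hunch2] at hbmem

-- ===== VERDICT (by name: the statement is the Claim_ definition above) =====
theorem count_descendants_py_spec : Claim_equal_count_descendants_py := by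
  intro eid cof _
  unfold Spec_count_descendants_py count_descendants_py count_descendants_py_alt
  have hA := pvLoopA_master cof eid (PySem.Set.ofList [eid]) [eid] 0
    (by
      constructor
      · intro x hx; simpa [PySem.Set.ofList, PySem.Set.add] using hx
      refine ⟨?_, ?_, ?_, ?_⟩
      · intro x hx
        have : x = eid := by simpa [PySem.Set.ofList, PySem.Set.add] using hx
        subst this; exact pvReach.base
      · simp [PySem.Set.ofList, PySem.Set.add]
      · simp [PySem.Set.ofList, PySem.Set.add]
      · intro a ha; left; simpa [PySem.Set.ofList, PySem.Set.add] using ha)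
  have hB := pvLoopB_master cof eid [eid]
    ⟨by simp, by simp, by intro x hx; simp at hx; subst hx; exact pvReach.base⟩
  obtain ⟨hcnt, hnodA, hmemA⟩ := hA
  obtain ⟨hnodB, hmemB⟩ := hB
  have hlen : (pvLoopA cof (PySem.Set.ofList [eid]) [eid] 0).1.length = (pvLoopB cof [eid]).length := by
    refine List.Perm.length_eq ((List.perm_ext_iff_of_nodup hnodA hnodB).2 ?_)
    intro a; rw [hmemA, hmemB]
  rw [hcnt, hlen]
  simp [PySem.Set.ofList, PySem.Set.add]
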